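-- pv_equiv track=rewrite | github.com/Teintes-BI/highland-metabolic-risk | src/ncdpipe/stability.py | _aggregate_onehot
-- ===== SOURCE A (Python) =====
-- def _aggregate_onehot(feature_names, base_features):
--     agg = {b: [] for b in base_features}
--     for name in feature_names:
--         for b in base_features:
--             if name == b or name.startswith(b + "_"):
--                 agg[b].append(name)
--                 break
--     return agg
-- ===== SOURCE B (Python) =====
-- def _aggregate_onehot(feature_names, base_features):
--     # Index each base by its first position once; for each name, look up its
--     # underscore-delimited prefixes (and the name itself) in that index and
--     # assign the name to the earliest-listed matching base.
--     first_pos = {}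
--     for i, b in enumerate(base_features):
--         if b not in first_pos:
--             first_pos[b] = i
--     buckets = {b: [] for b in base_features}
--     for name in feature_names:
--         cands = [name] + [name[:i] for i, ch in enumerate(name) if ch == "_"]
--         hits = [first_pos[c] for c in cands if c in first_pos]
--         if hits:
--             buckets[base_features[min(hits)]].append(name)
--     return buckets
-- ===== Notes on version B (the rewrite author's own statement) =====
-- stated objective: faster
-- what changed: Instead of scanning all base features per name with a startswith test, B builds a base-name-to-first-position dict once and, for each name, looks up only its underscore-delimited prefixes, assigning the name to the earliest-positioned matching base.
import Mathlib
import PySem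

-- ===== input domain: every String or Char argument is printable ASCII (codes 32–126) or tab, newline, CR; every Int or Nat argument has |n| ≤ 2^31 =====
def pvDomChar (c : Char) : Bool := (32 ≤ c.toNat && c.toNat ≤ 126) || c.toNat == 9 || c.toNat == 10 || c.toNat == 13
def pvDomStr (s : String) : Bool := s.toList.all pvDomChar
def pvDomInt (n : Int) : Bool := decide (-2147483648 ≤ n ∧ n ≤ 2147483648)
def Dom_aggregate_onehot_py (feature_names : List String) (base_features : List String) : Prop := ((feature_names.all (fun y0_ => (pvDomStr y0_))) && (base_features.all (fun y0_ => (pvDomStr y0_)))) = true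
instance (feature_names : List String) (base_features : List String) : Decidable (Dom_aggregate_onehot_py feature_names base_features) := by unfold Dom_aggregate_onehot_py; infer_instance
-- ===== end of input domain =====

-- B replaces A's per-name scan over all base features (with a startswith test each) by a
-- name→first-position index of the bases built once, looking up each name's
-- underscore-delimited prefixes and taking the earliest-positioned hit (objective: faster).

-- ===== PORT A =====
-- 'name == b or name.startswith(b + "_")'
def pvMatch (name b : String) : Bool :=
  name == b || PySem.Str.startswith name (b ++ "_")

-- inner 'for b in base_features: … break' loop of A
def pvALoop (name : String) (bs : List String) (d : PySem.Dict String (List String)) :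
    PySem.Dict String (List String) :=
  match bs with
  | [] => d
  | b :: rest =>
      if pvMatch name b then d.modify b [] (fun l => l ++ [name]) else pvALoop name rest d

def aggregate_onehot_py (feature_names : List String) (base_features : List String) :
    List (String × List String) :=
  let agg := base_features.foldl (fun d b => d.insert b ([] : List String)) PySem.Dict.empty
  (feature_names.foldl (fun d name => pvALoop name base_features d) agg).items

-- ===== PORT B =====
-- '[name] + [name[:i] for i, ch in enumerate(name) if ch == "_"]'
def pvCands (name : String) : List String :=
  name :: (PySem.List.enumerate name.toList).filterMap
    (fun p => if p.2 = '_' then some (PySem.Str.slice name none (some p.1)) else none)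

-- body of B's 'for name in feature_names' loop
def pvBStep (fp : PySem.Dict String Int) (bs : List String)
    (d : PySem.Dict String (List String)) (name : String) : PySem.Dict String (List String) :=
  -- hits = [first_pos[c] for c in cands if c in first_pos], consumed directly by min
  match PySem.List.min? ((pvCands name).filterMap (fun c => fp.get? c)) (fun x => x) with
  | none => d
  | some i => d.modify (PySem.List.pyGetD bs i "") [] (fun l => l ++ [name])

def aggregate_onehot_py_alt (feature_names : List String) (base_features : List String) :
    List (String × List String) :=
  let fp := (PySem.List.enumerate base_features).foldl
    (fun d p => if d.contains p.2 then d else d.insert p.2 p.1) PySem.Dict.empty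
  let buckets := base_features.foldl (fun d b => d.insert b ([] : List String)) PySem.Dict.empty
  (feature_names.foldl (fun d name => pvBStep fp base_features d name) buckets).items

-- ===== PRECONDITION & SPEC =====
def Spec_aggregate_onehot_py (feature_names : List String) (base_features : List String) (out : List (String × List String)) : Prop := out = aggregate_onehot_py_alt feature_names base_features
instance (feature_names : List String) (base_features : List String) (out : List (String × List String)) : Decidable (Spec_aggregate_onehot_py feature_names base_features out) := by unfold Spec_aggregate_onehot_py; infer_instance

-- ===== CLAIM (what is proved, stated in full; the proofs are below) =====
def Claim_equal_aggregate_onehot_py : Prop := ∀ (feature_names : List String) (base_features : List String), Dom_aggregate_onehot_py feature_names base_features → Spec_aggregate_onehot_py feature_names base_features (aggregate_onehot_py feature_names base_features)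

-- ===== LEMMAS AND PROOFS =====

-- B's first_pos dict looks up the first index of a base
theorem pvFp_get? (bs : List String) (s : Int) (d : PySem.Dict String Int) (c : String) :
    (((PySem.List.enumerate bs s).foldl
        (fun d p => if d.contains p.2 then d else d.insert p.2 p.1) d).get? c) =
      if d.contains c then d.get? c
      else (PySem.List.index? bs c).map (fun n : Nat => s + (n : Int)) := by
  have hcomp : ∀ (o : Option Nat) (s : Int),
      Option.map (fun n : Nat => s + (n : Int)) (Option.map (fun x => x + 1) o) =
        Option.map (fun n : Nat => (s + 1) + (n : Int)) o := by
    intro o s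
    cases o with
    | none => rfl
    | some a => simp only [Option.map_some]; congr 1; push_cast; ring
  induction bs generalizing s d with
  | nil =>
      simp only [PySem.List.enumerate_nil, List.foldl_nil]
      split
      · rfl
      · rename_i h
        rw [PySem.Dict.get?_eq_none_iff_contains d c |>.mpr (by simpa using h)]
        simp [PySem.List.index?]
  | cons b rest ih =>
      rw [PySem.List.enumerate_cons, List.foldl_cons]
      by_cases hdb : d.contains b = true
      · rw [if_pos hdb, ih (s + 1) d]
        by_cases hc : c = b
        · subst hc
          rw [if_pos hdb, if_pos hdb]
        · rw [PySem.List.index?_cons_of_ne rest (fun h => hc h.symm), hcomp]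
      · rw [if_neg hdb, ih (s + 1) (d.insert b s)]
        by_cases hc : c = b
        · subst hc
          rw [if_pos (PySem.Dict.contains_insert_self d c s),
            PySem.Dict.get?_insert_self, if_neg hdb,
            PySem.List.index?_cons_self c rest]
          simp
        · rw [PySem.Dict.contains_insert, PySem.Dict.get?_insert_of_ne _ _ hc]
          have hbeq : (c == b) = false := by simpa using hc
          rw [hbeq, Bool.false_or,
            PySem.List.index?_cons_of_ne rest (fun h => hc h.symm), hcomp]

-- min? commutes with a monotone map (min-preserving)
theorem pvMin?_map {κ κ' : Type} [LinearOrder κ] [LinearOrder κ'] (f : κ → κ')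
    (hf : ∀ a b, f (min a b) = min (f a) (f b)) (xs : List κ) :
    PySem.List.min? (xs.map f) (fun y => y) =
      (PySem.List.min? xs (fun y => y)).map f := by
  cases xs with
  | nil => simp [PySem.List.min?]
  | cons x t =>
      rw [List.map_cons, PySem.List.min?_id_cons, PySem.List.min?_id_cons]
      simp only [Option.map_some]
      congr 1
      induction t generalizing x with
      | nil => rfl
      | cons y t ih => simpa [hf] using ih (min x y)

-- the first base matching a candidate set is the base at the least candidate index
theorem pvFind?_eq_min (bs C : List String) :
    bs.find? (fun x => decide (x ∈ C)) =
      (PySem.List.min? (C.filterMap (PySem.List.index? bs)) (fun x => x)).map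
        (fun j => bs.getD j "") := by
  induction bs with
  | nil =>
      simp [PySem.List.min?, PySem.List.index?]
  | cons b rest ih =>
      by_cases hb : b ∈ C
      · have h0 : (0 : Nat) ∈ C.filterMap (PySem.List.index? (b :: rest)) :=
          List.mem_filterMap.mpr ⟨b, hb, PySem.List.index?_cons_self b rest⟩
        obtain ⟨m, hm⟩ : ∃ m, PySem.List.min? (C.filterMap (PySem.List.index? (b :: rest)))
            (fun x => x) = some m := by
          cases hmin : PySem.List.min? (C.filterMap (PySem.List.index? (b :: rest)))
              (fun x => x) with
          | none =>
              rw [PySem.List.min?_eq_none_iff] at hmin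
              rw [hmin] at h0; cases h0
          | some m => exact ⟨m, rfl⟩
        have hm0 : m = 0 := Nat.le_zero.mp (PySem.List.min?_isMin hm 0 h0)
        rw [hm, hm0]
        simp [hb]
      · have hstep : C.filterMap (PySem.List.index? (b :: rest)) =
            (C.filterMap (PySem.List.index? rest)).map (fun n => n + 1) := by
          rw [List.map_filterMap]
          exact List.filterMap_congr (fun c hc =>
            PySem.List.index?_cons_of_ne rest (fun h => hb (h ▸ hc)))
        have hfind : (b :: rest).find? (fun x => decide (x ∈ C)) =
            rest.find? (fun x => decide (x ∈ C)) := by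
          simp [hb]
        rw [hfind, ih, hstep,
          pvMin?_map (fun n => n + 1)
            (fun a b => by show min a b + 1 = min (a + 1) (b + 1); omega)]
        cases PySem.List.min? (C.filterMap (PySem.List.index? rest)) (fun x => x) with
        | none => rfl
        | some j => simp

-- prefix characterisation at the List Char level
theorem pvPrefix_iff (u s : List Char) :
    (u ++ ['_']) <+: s ↔ ∃ k, ∃ hk : k < s.length, s[k] = '_' ∧ u = s.take k := by
  constructor
  · rintro ⟨t, ht⟩
    rw [List.append_assoc] at ht
    subst ht
    refine ⟨u.length, by simp, by simp, by simp⟩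
  · rintro ⟨k, hk, hc, hu⟩
    have : u ++ ['_'] = s.take (k + 1) := by
      rw [List.take_add_one, hu]
      congr 1
      simp [List.getElem?_eq_getElem hk, hc]
    rw [this]
    exact List.take_prefix _ _

-- A's match test is membership in B's candidate list
theorem pvMatch_iff_mem_cands (name b : String) :
    pvMatch name b = true ↔ b ∈ pvCands name := by
  have hinj : ∀ (x y : String), x = y ↔ x.toList = y.toList :=
    fun x y => ⟨congrArg _, fun h => by
      rw [← String.ofList_toList (s := x), ← String.ofList_toList (s := y), h]⟩
  have hslice : ∀ k : Nat, (PySem.Str.slice name none (some (k : Int))).toList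
      = name.toList.take k := by
    intro k
    rw [PySem.Str.toList_slice, PySem.Chars.slice_eq_listSlice, PySem.List.slice_to_natCast]
  unfold pvMatch pvCands
  rw [Bool.or_eq_true, beq_iff_eq, PySem.Str.startswith_eq]
  have happ : (b ++ "_").toList = b.toList ++ ['_'] := by simp
  rw [happ, PySem.Chars.startswith_iff, pvPrefix_iff, List.mem_cons, List.mem_filterMap]
  constructor
  · rintro (h | ⟨k, hk, hc, hu⟩)
    · exact Or.inl h.symm
    · refine Or.inr ⟨((k : Int), name.toList[k]),
        (PySem.List.mem_enumerate_iff _ _ _).mpr ⟨k, hk, by simp⟩, ?_⟩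
      show (if name.toList[k] = '_' then
        some (PySem.Str.slice name none (some (k : Int))) else none) = some b
      rw [if_pos hc]
      congr 1
      rw [hinj, hslice]
      exact hu.symm
  · rintro (h | ⟨p, hp, hif⟩)
    · exact Or.inl h.symm
    · obtain ⟨k, hk, rfl⟩ := (PySem.List.mem_enumerate_iff _ _ _).mp hp
      right
      rw [show ((0 : Int) + (k : Int), name.toList[k]).2 = name.toList[k] from rfl] at hif
      rw [show ((0 : Int) + (k : Int), name.toList[k]).1 = ((k : Int)) from by simp] at hif
      by_cases hc : name.toList[k] = '_'
      · rw [if_pos hc] at hif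
        injection hif with hb
        refine ⟨k, hk, hc, ?_⟩
        rw [hinj, hslice] at hb
        exact hb.symm
      · rw [if_neg hc] at hif; cases hif

-- A's inner loop is find? of the first matching base
theorem pvALoop_eq_find? (name : String) (bs : List String) (d : PySem.Dict String (List String)) :
    pvALoop name bs d =
      match bs.find? (pvMatch name) with
      | none => d
      | some b => d.modify b [] (fun l => l ++ [name]) := by
  induction bs with
  | nil => rfl
  | cons b rest ih =>
      rw [List.find?_cons]
      by_cases h : pvMatch name b = true
      · simp [pvALoop, h]
      · simp only [Bool.not_eq_true] at h
        simp [pvALoop, h, ih]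

-- the per-name steps of A and B coincide
theorem pvStep_eq (bs : List String) (name : String) (d : PySem.Dict String (List String)) :
    pvALoop name bs d =
      pvBStep ((PySem.List.enumerate bs).foldl
        (fun d p => if d.contains p.2 then d else d.insert p.2 p.1) PySem.Dict.empty)
        bs d name := by
  unfold pvBStep
  have hget : ∀ c, (((PySem.List.enumerate bs).foldl
      (fun d p => if d.contains p.2 then d else d.insert p.2 p.1)
      PySem.Dict.empty).get? c) = (PySem.List.index? bs c).map (fun n : Nat => (n : Int)) := by
    intro c
    rw [pvFp_get? bs 0 PySem.Dict.empty c]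
    simp [PySem.Dict.contains_empty]
  have hhits : (pvCands name).filterMap (fun c =>
      ((PySem.List.enumerate bs).foldl
        (fun d p => if d.contains p.2 then d else d.insert p.2 p.1)
        PySem.Dict.empty).get? c) =
      ((pvCands name).filterMap (PySem.List.index? bs)).map (fun n : Nat => (n : Int)) := by
    rw [List.map_filterMap]
    exact List.filterMap_congr (fun c _ => hget c)
  rw [pvALoop_eq_find? name bs d]
  have hpred : (pvMatch name) = (fun x => decide (x ∈ pvCands name)) := by
    funext b
    rcases h : pvMatch name b with _ | _
    · exact (decide_eq_false (fun hm => by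
        rw [(pvMatch_iff_mem_cands name b).mpr hm] at h; cases h)).symm
    · exact (decide_eq_true ((pvMatch_iff_mem_cands name b).mp h)).symm
  rw [hpred, pvFind?_eq_min bs (pvCands name)]
  rw [hhits, pvMin?_map (fun n : Nat => (n : Int)) (fun a b => by push_cast; exact rfl)]
  cases hmin : PySem.List.min? ((pvCands name).filterMap (PySem.List.index? bs))
      (fun x => x) with
  | none => rfl
  | some j =>
      simp only [Option.map_some]
      rw [PySem.List.pyGetD_natCast]

-- ===== VERDICT (by name: the statement is the Claim_ definition above) =====
theorem aggregate_onehot_py_spec : Claim_equal_aggregate_onehot_py := by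
  intro feature_names base_features _
  unfold Spec_aggregate_onehot_py aggregate_onehot_py aggregate_onehot_py_alt
  have hf : (fun d name => pvALoop name base_features d) =
      (fun d name => pvBStep ((PySem.List.enumerate base_features).foldl
        (fun d p => if d.contains p.2 then d else d.insert p.2 p.1) PySem.Dict.empty)
        base_features d name) := by
    funext d name
    exact pvStep_eq base_features name d
  simp only [hf]
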